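-- pv_equiv track=rewrite | github.com/SimonCodingWithTheBoys/bookbot | test.py | letter_count_of_book
-- ===== SOURCE A (Python) =====
-- def letter_count_of_book(book):
--     dic_with_letters = {}
--     for letter in book:
--         lowered = letter.lower()
--         if lowered not in dic_with_letters:
--             dic_with_letters[lowered] = 1
--         else:
--             dic_with_letters[lowered] += 1
--     return dic_with_letters
-- ===== SOURCE B (Python) =====
-- def letter_count_of_book(book):
--     lowered = [letter.lower() for letter in book]
--     return {c: lowered.count(c) for c in dict.fromkeys(lowered)}
-- ===== Notes on version B (the rewrite author's own statement) =====
-- stated objective: idiomatic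
-- what changed: Replaces the single accumulating dict-update pass with a 'materialize lowered list, dedup in first-occurrence order, count each distinct element by rescanning' comprehension.
import Mathlib
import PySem

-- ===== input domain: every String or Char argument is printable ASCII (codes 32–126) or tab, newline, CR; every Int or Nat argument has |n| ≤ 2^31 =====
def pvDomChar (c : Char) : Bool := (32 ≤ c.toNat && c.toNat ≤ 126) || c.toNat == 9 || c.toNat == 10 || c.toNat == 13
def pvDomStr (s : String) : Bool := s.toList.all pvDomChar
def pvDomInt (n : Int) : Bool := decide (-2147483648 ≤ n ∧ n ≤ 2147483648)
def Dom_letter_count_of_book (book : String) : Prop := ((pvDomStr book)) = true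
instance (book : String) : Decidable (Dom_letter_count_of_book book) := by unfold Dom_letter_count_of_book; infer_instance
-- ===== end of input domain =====

-- ===== PORT A =====
-- B deduplicates the lowered character list and counts each distinct element; same dict as A.
def letter_count_of_book (book : String) : List (String × Int) :=
  (book.toList.foldl (fun d letter =>
      let lowered := PySem.Str.lower (String.singleton letter)
      if d.contains lowered = false then d.insert lowered 1
      else d.insert lowered (d.getD lowered 0 + 1))
    PySem.Dict.empty).items

-- ===== PORT B =====
def letter_count_of_book_alt (book : String) : List (String × Int) :=
  let lowered := book.toList.map (fun letter => PySem.Str.lower (String.singleton letter))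
  (PySem.List.dedup lowered).map (fun c => (c, (lowered.count c : Int)))

-- ===== PRECONDITION & SPEC =====
def Spec_letter_count_of_book (book : String) (out : List (String × Int)) : Prop := out = letter_count_of_book_alt book
instance (book : String) (out : List (String × Int)) : Decidable (Spec_letter_count_of_book book out) := by unfold Spec_letter_count_of_book; infer_instance

-- ===== CLAIM (what is proved, stated in full; the proofs are below) =====
def Claim_equal_letter_count_of_book : Prop := ∀ (book : String), Dom_letter_count_of_book book → Spec_letter_count_of_book book (letter_count_of_book book)

-- ===== LEMMAS AND PROOFS =====

-- ===== VERDICT (by name: the statement is the Claim_ definition above) =====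
theorem letter_count_of_book_spec : Claim_equal_letter_count_of_book := by
  intro book _
  unfold Spec_letter_count_of_book letter_count_of_book letter_count_of_book_alt
  dsimp only
  rw [← List.foldl_map (f := fun letter => PySem.Str.lower (String.singleton letter))
    (g := fun (d : PySem.Dict String Int) x =>
      if d.contains x = false then d.insert x 1 else d.insert x (d.getD x 0 + 1))]
  rw [PySem.List.foldl_congr_mem _ _
    (fun (d : PySem.Dict String Int) x => d.insert x (d.getD x 0 + 1)) _
    (by
      intro d x _
      by_cases h : d.contains x = true
      · simp [h]
      · simp only [Bool.not_eq_true] at h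
        simp [h, PySem.Dict.getD_of_not_contains d (0 : Int) h])]
  rw [PySem.Dict.foldl_insert_getD_add_one_eq_counter, PySem.Dict.items_counter]
  simp
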